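-- pv_equiv track=rewrite | github.com/svillav/PDI_TUIA_2026 | PROBLEMA2.py | encontrar_lineas_1d
-- ===== SOURCE A (Python) =====
-- def encontrar_lineas_1d(arr, umbral):
--     centros = []
--     en_linea = False
--     inicio = 0
--     for i, val in enumerate(arr):
--         if val and not en_linea:
--             en_linea = True
--             inicio = i
--         elif not val and en_linea:
--             en_linea = False
--             centros.append((inicio + i) // 2)
--     if en_linea:
--         centros.append((inicio + len(arr)) // 2)
--     return centros
-- ===== SOURCE B (Python) =====
-- def encontrar_lineas_1d(arr, umbral):
--     # boundary detection: a run starts where a truthy follows a falsy, and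
--     # ends (exclusive) after a truthy followed by a falsy; pair them up.
--     starts = [i for i, (v, p) in enumerate(zip(arr, [0] + arr)) if v and not p]
--     ends = [i + 1 for i, (v, q) in enumerate(zip(arr, arr[1:] + [0])) if v and not q]
--     return [(s + e) // 2 for s, e in zip(starts, ends)]
-- ===== Notes on version B (the rewrite author's own statement) =====
-- stated objective: alternative
-- what changed: B replaces A's sequential en_linea/inicio state machine by boundary detection: it zips the array with its two shifts to collect all run-start indices and all run-end indices in separate passes, then pairs them positionally to compute the centers.
import Mathlib
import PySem

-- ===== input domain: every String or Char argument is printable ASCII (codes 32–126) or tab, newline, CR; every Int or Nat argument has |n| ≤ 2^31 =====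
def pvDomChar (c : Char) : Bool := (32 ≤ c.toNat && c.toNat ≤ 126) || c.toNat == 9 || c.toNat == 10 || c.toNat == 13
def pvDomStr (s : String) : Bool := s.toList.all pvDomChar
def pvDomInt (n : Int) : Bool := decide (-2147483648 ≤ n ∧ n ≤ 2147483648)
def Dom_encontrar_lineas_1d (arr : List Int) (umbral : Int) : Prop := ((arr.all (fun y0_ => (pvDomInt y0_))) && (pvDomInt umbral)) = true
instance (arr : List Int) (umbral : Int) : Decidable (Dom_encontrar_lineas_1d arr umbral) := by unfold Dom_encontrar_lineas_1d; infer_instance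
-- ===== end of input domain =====

-- B replaces A's run state machine by boundary detection over shifted zips (alternative); return value only.


-- ===== PORT A =====
-- loop body of A: state = (centros, en_linea, inicio), element = (i, val)
def pvStepA (s : List Int × Bool × Int) (p : Int × Int) : List Int × Bool × Int :=
  if p.2 ≠ 0 ∧ s.2.1 = false then (s.1, true, p.1)
  else if p.2 = 0 ∧ s.2.1 = true then (s.1 ++ [PySem.Int.floordiv (s.2.2 + p.1) 2], false, s.2.2)
  else s

def encontrar_lineas_1d (arr : List Int) (umbral : Int) : List Int :=
  let st := (PySem.List.enumerate arr).foldl pvStepA ([], false, 0)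
  if st.2.1 = true then st.1 ++ [PySem.Int.floordiv (st.2.2 + (arr.length : Int)) 2] else st.1

-- ===== PORT B =====
-- [i for i,(v,p) in enumerate(zip(arr, [0]+arr)) if v and not p]  (zip truncates to len(arr));
-- arr[1:] is arr.tail (PySem.List.slice_from_one, exact)
def encontrar_lineas_1d_alt (arr : List Int) (umbral : Int) : List Int :=
  let starts := ((PySem.List.enumerate (arr.zip (0 :: arr))).filter
      (fun q => decide (q.2.1 ≠ 0 ∧ q.2.2 = 0))).map (fun q => q.1)
  let ends := ((PySem.List.enumerate (arr.zip (arr.tail ++ [0]))).filter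
      (fun q => decide (q.2.1 ≠ 0 ∧ q.2.2 = 0))).map (fun q => q.1 + 1)
  (starts.zip ends).map (fun p => PySem.Int.floordiv (p.1 + p.2) 2)

-- ===== PRECONDITION & SPEC =====
def Spec_encontrar_lineas_1d (arr : List Int) (umbral : Int) (out : List Int) : Prop := out = encontrar_lineas_1d_alt arr umbral
instance (arr : List Int) (umbral : Int) (out : List Int) : Decidable (Spec_encontrar_lineas_1d arr umbral out) := by unfold Spec_encontrar_lineas_1d; infer_instance

-- ===== CLAIM (what is proved, stated in full; the proofs are below) =====
def Claim_equal_encontrar_lineas_1d : Prop := ∀ (arr : List Int) (umbral : Int), Dom_encontrar_lineas_1d arr umbral → Spec_encontrar_lineas_1d arr umbral (encontrar_lineas_1d arr umbral)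

-- ===== LEMMAS AND PROOFS =====
-- A's run on a suffix starting at absolute index j, from state (acc, b, s)
def pvRunA (arr : List Int) (j : Int) (acc : List Int) (b : Bool) (s : Int) : List Int :=
  let st := (PySem.List.enumerate arr j).foldl pvStepA (acc, b, s)
  if st.2.1 = true then st.1 ++ [PySem.Int.floordiv (st.2.2 + (j + (arr.length : Int))) 2] else st.1

-- run-start indices of arr beginning at index j, given previous element truthiness b
def pvStartsB : List Int → Bool → Int → List Int
  | [], _, _ => []
  | x :: xs, b, j =>
    if x ≠ 0 ∧ b = false then j :: pvStartsB xs (decide (x ≠ 0)) (j + 1)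
    else pvStartsB xs (decide (x ≠ 0)) (j + 1)

-- run-end indices (exclusive) via the previous-element (trailing edge) formulation
def pvEndsPrev : List Int → Bool → Int → List Int
  | [], b, j => if b then [j] else []
  | x :: xs, b, j =>
    if x = 0 ∧ b = true then j :: pvEndsPrev xs false (j + 1)
    else pvEndsPrev xs (decide (x ≠ 0)) (j + 1)

-- run-end indices (exclusive) via the lookahead formulation B uses
def pvEndsLook : List Int → Int → List Int
  | [], _ => []
  | x :: xs, j =>
    if x ≠ 0 ∧ xs.headD 0 = 0 then (j + 1) :: pvEndsLook xs (j + 1)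
    else pvEndsLook xs (j + 1)

lemma pvRunA_cons (x : Int) (xs : List Int) (j : Int) (acc : List Int) (b : Bool) (s : Int) :
    pvRunA (x :: xs) j acc b s =
      pvRunA xs (j + 1) (pvStepA (acc, b, s) (j, x)).1 (pvStepA (acc, b, s) (j, x)).2.1
        (pvStepA (acc, b, s) (j, x)).2.2 := by
  unfold pvRunA
  rw [PySem.List.enumerate_cons]
  simp only [List.foldl_cons]
  have h : (j + ((x :: xs).length : Int)) = (j + 1) + (xs.length : Int) := by
    push_cast [List.length_cons]; ring
  rw [h]

lemma pvMain : ∀ (arr : List Int) (j : Int) (acc : List Int) (b : Bool) (s : Int),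
    pvRunA arr j acc b s =
      acc ++ ((((if b then [s] else []) ++ pvStartsB arr b j).zip (pvEndsPrev arr b j)).map
        (fun p => PySem.Int.floordiv (p.1 + p.2) 2)) := by
  intro arr
  induction arr with
  | nil =>
      intro j acc b s
      cases b <;> simp [pvRunA, pvStartsB, pvEndsPrev, PySem.List.enumerate_nil]
  | cons x xs ih =>
      intro j acc b s
      rw [pvRunA_cons]
      by_cases hx : x = 0
      · subst hx
        cases b
        · rw [show pvStepA (acc, false, s) (j, 0) = (acc, false, s) from by simp [pvStepA]]
          rw [ih]
          simp [pvStartsB, pvEndsPrev]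
        · rw [show pvStepA (acc, true, s) (j, 0) =
              (acc ++ [PySem.Int.floordiv (s + j) 2], false, s) from by simp [pvStepA]]
          rw [ih]
          simp [pvStartsB, pvEndsPrev]
      · cases b
        · rw [show pvStepA (acc, false, s) (j, x) = (acc, true, j) from by simp [pvStepA, hx]]
          rw [ih]
          simp [pvStartsB, pvEndsPrev, hx]
        · rw [show pvStepA (acc, true, s) (j, x) = (acc, true, s) from by simp [pvStepA, hx]]
          rw [ih]
          simp [pvStartsB, pvEndsPrev, hx]

-- trailing-edge ends = lookahead ends (plus a pending head end when b holds)
lemma pvEndsEq : ∀ (arr : List Int) (b : Bool) (j : Int),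
    pvEndsPrev arr b j =
      (if b = true ∧ arr.headD 0 = 0 then [j] else []) ++ pvEndsLook arr j := by
  intro arr
  induction arr with
  | nil => intro b j; cases b <;> simp [pvEndsPrev, pvEndsLook]
  | cons x xs ih =>
      intro b j
      by_cases hx : x = 0
      · subst hx
        cases b
        · simp [pvEndsPrev, pvEndsLook, ih]
        · simp [pvEndsPrev, pvEndsLook, ih]
      · cases b <;> simp [pvEndsPrev, pvEndsLook, hx, ih] <;> split <;> simp

-- B's first comprehension computes pvStartsB
lemma pvStartsEq : ∀ (arr : List Int) (p j : Int),
    ((PySem.List.enumerate (arr.zip (p :: arr)) j).filter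
        (fun q => !decide (q.2.1 = 0) && decide (q.2.2 = 0))).map (fun q => q.1) =
      pvStartsB arr (decide (p ≠ 0)) j := by
  intro arr
  induction arr with
  | nil => intro p j; simp [pvStartsB, PySem.List.enumerate_nil]
  | cons x xs ih =>
      intro p j
      rw [show (x :: xs).zip (p :: x :: xs) = (x, p) :: xs.zip (x :: xs) from rfl]
      rw [PySem.List.enumerate_cons]
      by_cases hx : x = 0 <;> by_cases hp : p = 0 <;>
        simp [pvStartsB, hx, hp, ih x (j + 1), ih 0 (j + 1)]

-- B's second comprehension computes pvEndsLook
lemma pvEndsLookEq : ∀ (arr : List Int) (j : Int),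
    ((PySem.List.enumerate (arr.zip (arr.tail ++ [0])) j).filter
        (fun q => !decide (q.2.1 = 0) && decide (q.2.2 = 0))).map (fun q => q.1 + 1) =
      pvEndsLook arr j := by
  intro arr
  induction arr with
  | nil => intro j; simp [pvEndsLook, PySem.List.enumerate_nil]
  | cons x xs ih =>
      intro j
      cases xs with
      | nil =>
          by_cases hx : x = 0 <;>
            simp [pvEndsLook, hx, PySem.List.enumerate_cons, PySem.List.enumerate_nil]
      | cons y ys =>
          rw [show (x :: y :: ys).zip ((x :: y :: ys).tail ++ [0]) =
              (x, y) :: (y :: ys).zip ((y :: ys).tail ++ [0]) from rfl]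
          rw [PySem.List.enumerate_cons]
          have ih' := ih (j + 1)
          simp only [List.tail_cons] at ih'
          by_cases hx : x = 0 <;> by_cases hy : y = 0 <;>
            simp_all [pvEndsLook, List.headD]

-- ===== VERDICT (by name: the statement is the Claim_ definition above) =====
theorem encontrar_lineas_1d_spec : Claim_equal_encontrar_lineas_1d := by
  intro arr umbral _
  have h1 : encontrar_lineas_1d arr umbral = pvRunA arr 0 [] false 0 := by
    unfold encontrar_lineas_1d pvRunA
    norm_num
  unfold Spec_encontrar_lineas_1d
  rw [h1, pvMain]
  unfold encontrar_lineas_1d_alt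
  simp only [ne_eq, Bool.decide_and, decide_not]
  rw [pvStartsEq arr 0, pvEndsLookEq arr]
  have hends := pvEndsEq arr false 0
  simp [hends]
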